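-- pv_equiv track=rewrite | github.com/philsmith4321-ui/zerona-content-engine | app/services/patient_service.py | auto_map_columns
-- ===== SOURCE A (Python) =====
-- EXPECTED_COLUMNS = {
--     "email": ["email", "e-mail", "email_address", "emailaddress"],
--     "first_name": ["first_name", "firstname", "first", "fname", "name"],
--     "last_name": ["last_name", "lastname", "last", "lname", "surname"],
--     "phone": ["phone", "phone_number", "phonenumber", "mobile", "cell"],
--     "last_visit_date": ["last_visit_date", "lastvisit", "last_visit", "last_appt", "lastappointment"],
--     "gender": ["gender", "sex"],
--     "age": ["age"],
--     "tags": ["tags", "categories", "groups"],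
-- }
--
-- def auto_map_columns(header_row: list[str]) -> dict[str, str]:
--     """Attempt to auto-map CSV columns to our expected fields."""
--     mapping = {}
--     header_lower = [h.strip().lower().replace(" ", "_") for h in header_row]
--     for field, aliases in EXPECTED_COLUMNS.items():
--         for i, col in enumerate(header_lower):
--             if col in aliases:
--                 mapping[field] = header_row[i].strip()
--                 break
--     return mapping
-- ===== SOURCE B (Python) =====
-- EXPECTED_COLUMNS = {
--     "email": ["email", "e-mail", "email_address", "emailaddress"],
--     "first_name": ["first_name", "firstname", "first", "fname", "name"],
--     "last_name": ["last_name", "lastname", "last", "lname", "surname"],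
--     "phone": ["phone", "phone_number", "phonenumber", "mobile", "cell"],
--     "last_visit_date": ["last_visit_date", "lastvisit", "last_visit", "last_appt", "lastappointment"],
--     "gender": ["gender", "sex"],
--     "age": ["age"],
--     "tags": ["tags", "categories", "groups"],
-- }
--
-- ALIAS_TO_FIELD = {alias: field for field, aliases in EXPECTED_COLUMNS.items() for alias in aliases}
--
--
-- def auto_map_columns(header_row: list[str]) -> dict[str, str]:
--     """Attempt to auto-map CSV columns to our expected fields."""
--     found = {}
--     for h in header_row:
--         field = ALIAS_TO_FIELD.get(h.strip().lower().replace(" ", "_"))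
--         if field is not None and field not in found:
--             found[field] = h.strip()
--     return {f: found[f] for f in EXPECTED_COLUMNS if f in found}
-- ===== Notes on version B (the rewrite author's own statement) =====
-- stated objective: idiomatic
-- what changed: A rescans the whole normalized header row once per expected field (8 nested scans); B inverts EXPECTED_COLUMNS into a precomputed alias-to-field dict, classifies each header in a single pass with first-hit-per-field wins, and then emits the found fields in EXPECTED_COLUMNS order.
import Mathlib
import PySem

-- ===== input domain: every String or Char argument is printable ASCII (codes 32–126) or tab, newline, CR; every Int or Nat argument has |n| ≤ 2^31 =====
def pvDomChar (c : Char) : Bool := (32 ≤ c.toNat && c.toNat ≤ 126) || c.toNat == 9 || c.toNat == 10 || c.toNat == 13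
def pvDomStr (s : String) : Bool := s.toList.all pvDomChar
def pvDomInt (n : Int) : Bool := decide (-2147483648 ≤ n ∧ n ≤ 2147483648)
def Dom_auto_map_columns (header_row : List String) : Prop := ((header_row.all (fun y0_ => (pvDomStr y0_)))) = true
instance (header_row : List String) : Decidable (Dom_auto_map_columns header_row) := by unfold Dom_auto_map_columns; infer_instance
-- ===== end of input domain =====

-- B replaces A's per-field rescan of the header row by one pass over the headers with a
-- precomputed alias→field dict, then emits the found fields in EXPECTED_COLUMNS order.

-- ===== PORT A =====
-- EXPECTED_COLUMNS.items(), in insertion order.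
def pvFields : List (String × List String) :=
  [("email", ["email", "e-mail", "email_address", "emailaddress"]),
   ("first_name", ["first_name", "firstname", "first", "fname", "name"]),
   ("last_name", ["last_name", "lastname", "last", "lname", "surname"]),
   ("phone", ["phone", "phone_number", "phonenumber", "mobile", "cell"]),
   ("last_visit_date", ["last_visit_date", "lastvisit", "last_visit", "last_appt", "lastappointment"]),
   ("gender", ["gender", "sex"]),
   ("age", ["age"]),
   ("tags", ["tags", "categories", "groups"])]

-- h.strip().lower().replace(" ", "_")
def pvNorm (h : String) : String :=
  PySem.Str.replace (PySem.Str.lower (PySem.Str.strip h)) " " "_"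

-- A's inner loop 'for i, col in enumerate(header_lower): if col in aliases: … header_row[i].strip(); break',
-- ported over the zip of the originals with their lowered forms (the index i is always in range).
def pvScanA (pairs : List (String × String)) (aliases : List String) : Option String :=
  match pairs with
  | [] => none
  | (orig, low) :: rest =>
      if aliases.contains low then some (PySem.Str.strip orig) else pvScanA rest aliases

def auto_map_columns (header_row : List String) : List (String × String) :=
  let header_lower := header_row.map pvNorm
  (pvFields.foldl (fun (mapping : PySem.Dict String String) fa =>
      match pvScanA (header_row.zip header_lower) fa.2 with
      | some v => mapping.insert fa.1 v
      | none => mapping) PySem.Dict.empty).items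

-- ===== PORT B =====
-- ALIAS_TO_FIELD = {alias: field for field, aliases in EXPECTED_COLUMNS.items() for alias in aliases}
def pvAliasToField : PySem.Dict String String :=
  pvFields.foldl (fun d fa => fa.2.foldl (fun d a => d.insert a fa.1) d) PySem.Dict.empty

-- B's single pass over the headers: first hit per field wins.
def pvFoundLoop (header_row : List String) : PySem.Dict String String :=
  header_row.foldl (fun found h =>
      match pvAliasToField.get? (pvNorm h) with
      | some field =>
          if found.contains field then found else found.insert field (PySem.Str.strip h)
      | none => found) PySem.Dict.empty

-- {f: found[f] for f in EXPECTED_COLUMNS if f in found}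
def auto_map_columns_alt (header_row : List String) : List (String × String) :=
  let found := pvFoundLoop header_row
  (pvFields.foldl (fun (m : PySem.Dict String String) fa =>
      match found.get? fa.1 with
      | some v => m.insert fa.1 v
      | none => m) PySem.Dict.empty).items

-- ===== PRECONDITION & SPEC =====
def Spec_auto_map_columns (header_row : List String) (out : List (String × String)) : Prop := out = auto_map_columns_alt header_row
instance (header_row : List String) (out : List (String × String)) : Decidable (Spec_auto_map_columns header_row out) := by unfold Spec_auto_map_columns; infer_instance

-- ===== CLAIM (what is proved, stated in full; the proofs are below) =====
def Claim_equal_auto_map_columns : Prop := ∀ (header_row : List String), Dom_auto_map_columns header_row → Spec_auto_map_columns header_row (auto_map_columns header_row)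

-- ===== LEMMAS AND PROOFS =====

-- ALIAS_TO_FIELD as a literal association list (its 30 items, in insertion order).
def pvAliasPairs : List (String × String) :=
  [("email", "email"), ("e-mail", "email"), ("email_address", "email"), ("emailaddress", "email"),
   ("first_name", "first_name"), ("firstname", "first_name"), ("first", "first_name"), ("fname", "first_name"), ("name", "first_name"),
   ("last_name", "last_name"), ("lastname", "last_name"), ("last", "last_name"), ("lname", "last_name"), ("surname", "last_name"),
   ("phone", "phone"), ("phone_number", "phone"), ("phonenumber", "phone"), ("mobile", "phone"), ("cell", "phone"),
   ("last_visit_date", "last_visit_date"), ("lastvisit", "last_visit_date"), ("last_visit", "last_visit_date"), ("last_appt", "last_visit_date"), ("lastappointment", "last_visit_date"),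
   ("gender", "gender"), ("sex", "gender"), ("age", "age"),
   ("tags", "tags"), ("categories", "tags"), ("groups", "tags")]

lemma pvAliasDict_eq : pvAliasToField = PySem.Dict.mk pvAliasPairs := by decide

lemma pvGet?_mk_eq_find? (ps : List (String × String)) (s : String) :
    (PySem.Dict.mk ps).get? s = (ps.find? (fun p => p.1 == s)).map Prod.snd := by
  induction ps with
  | nil => rfl
  | cons p rest ih =>
      obtain ⟨k, v⟩ := p
      rw [PySem.Dict.get?_mk_cons]
      cases hk : (k == s) with
      | true => simp [hk]
      | false => simp [hk, ih]

-- One symbolic helper instead of 240 string case splits: the alias dict answers `some f`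
-- exactly on f's aliases, given the (decidable, concrete) inclusion facts.
lemma pvHelper (f : String) (al : List String)
    (hsub : ∀ p ∈ pvAliasPairs, p.2 = f → p.1 ∈ al)
    (hal : ∀ a ∈ al, ((pvAliasPairs.find? (fun p => p.1 == a)).map Prod.snd) = some f)
    (s : String) :
    pvAliasToField.get? s = some f ↔ al.contains s = true := by
  rw [pvAliasDict_eq, pvGet?_mk_eq_find?]
  constructor
  · intro h
    cases hf : pvAliasPairs.find? (fun p => p.1 == s) with
    | none => rw [hf] at h; simp at h
    | some p =>
        rw [hf] at h
        simp only [Option.map_some, Option.some.injEq] at h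
        have hm := List.mem_of_find?_eq_some hf
        have hps : p.1 = s := by simpa using List.find?_some hf
        have h1 : p.1 ∈ al := hsub p hm h
        have : s ∈ al := by rwa [hps] at h1
        exact List.contains_iff_exists_mem_beq.mpr ⟨s, this, by simp⟩
  · intro h
    obtain ⟨a', ha', hb⟩ := List.contains_iff_exists_mem_beq.mp h
    rw [eq_of_beq hb]
    exact hal a' ha'

lemma pvAlias_iff (f : String) (al : List String) (hmem : (f, al) ∈ pvFields) (s : String) :
    pvAliasToField.get? s = some f ↔ al.contains s = true := by
  fin_cases hmem <;> exact pvHelper _ _ (by decide) (by decide) s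

-- Loop invariant for B's single pass: the first-hit-wins dict answers, at field f,
-- exactly what A's per-field scan of the (remaining) headers answers.
lemma pvFound_get (f : String) (al : List String)
    (H : ∀ s, pvAliasToField.get? s = some f ↔ al.contains s = true) :
    ∀ (hs : List String) (found : PySem.Dict String String),
      ((hs.foldl (fun found h =>
          match pvAliasToField.get? (pvNorm h) with
          | some field =>
              if found.contains field then found else found.insert field (PySem.Str.strip h)
          | none => found) found).get? f)
        = (found.get? f).or (pvScanA (hs.zip (hs.map pvNorm)) al) := by
  intro hs
  induction hs with
  | nil => intro found; simp [pvScanA]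
  | cons h t ih =>
      intro found
      simp only [List.foldl_cons, List.map_cons, List.zip_cons_cons, pvScanA]
      cases hc : pvAliasToField.get? (pvNorm h) with
      | none =>
          have hal : al.contains (pvNorm h) = false := by
            cases hx : al.contains (pvNorm h)
            · rfl
            · exact absurd ((H _).mpr hx) (by simp [hc])
          simp only [hal, Bool.false_eq_true, if_false]
          exact ih found
      | some g =>
          by_cases hg : g = f
          · subst hg
            have hal : al.contains (pvNorm h) = true := (H _).mp hc
            simp only [hal, if_true]
            by_cases hcf : found.contains g
            · rw [if_pos hcf, ih]
              have hsome : (found.get? g).isSome := by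
                rw [← PySem.Dict.contains_eq_isSome_get?]; exact hcf
              obtain ⟨v, hv⟩ := Option.isSome_iff_exists.mp hsome
              rw [hv]; rfl
            · rw [if_neg hcf, ih]
              have hnone : found.get? g = none :=
                (PySem.Dict.get?_eq_none_iff_contains _ _).mpr (by simpa using hcf)
              rw [hnone, PySem.Dict.get?_insert_self]; rfl
          · have hal : al.contains (pvNorm h) = false := by
              cases hx : al.contains (pvNorm h)
              · rfl
              · exact absurd ((H _).mpr hx) (by rw [hc]; simp [hg])
            simp only [hal, Bool.false_eq_true, if_false]
            by_cases hcg : found.contains g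
            · rw [if_pos hcg, ih]
            · rw [if_neg hcg, ih,
                  PySem.Dict.get?_insert_of_ne found (PySem.Str.strip h) (fun e => hg e.symm)]

lemma pvBridge (hr : List String) :
    ∀ f al, (f, al) ∈ pvFields →
      (pvFoundLoop hr).get? f = pvScanA (hr.zip (hr.map pvNorm)) al := by
  intro f al hm
  rw [pvFoundLoop, pvFound_get f al (pvAlias_iff f al hm), PySem.Dict.get?_empty]
  rfl

-- ===== VERDICT (by name: the statement is the Claim_ definition above) =====
theorem auto_map_columns_spec : Claim_equal_auto_map_columns := by
  intro hr _
  unfold Spec_auto_map_columns auto_map_columns auto_map_columns_alt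
  simp only []
  congr 1
  apply PySem.List.foldl_congr_mem
  intro acc fa hfa
  rw [pvBridge hr fa.1 fa.2 (by simpa using hfa)]
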